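-- pv_equiv track=rewrite | github.com/SaitoLab-Nitech/VTDroid | smalien/core/dynamic_analysis_executor/dataflow_tracer/emulator/taint_executor/cd_flow_tracker/information_preservation_inspector/information_preservation_inspector.py | __check_unique_decodability
-- ===== SOURCE A (Python) =====
-- def __check_unique_decodability(words, codewords):
--     assert len(words) == len(codewords)
--     mapping = {}
--     result = True
--     for i in range(len(codewords)):
--         w = words[i]
--         cw = codewords[i]
--         if (cw not in mapping.keys()):
--             mapping[cw] = w
--         elif (mapping[cw] != w):
--             result = False
--             break
--     return result
-- ===== SOURCE B (Python) =====
-- def __check_unique_decodability(words, codewords):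
--     assert len(words) == len(codewords)
--     groups = {}
--     for w, cw in zip(words, codewords):
--         groups.setdefault(cw, []).append(w)
--     return all(all(x == g[0] for x in g) for g in groups.values())
-- ===== Notes on version B (the rewrite author's own statement) =====
-- stated objective: alternative
-- what changed: B replaces A's single pass that records the first word per codeword in a dict and breaks on the first mismatch with a group-then-verify decomposition: one pass builds a dict from each codeword to the list of all its words, then a second pass checks every group is constant (all equal to its first element).
import Mathlib
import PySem

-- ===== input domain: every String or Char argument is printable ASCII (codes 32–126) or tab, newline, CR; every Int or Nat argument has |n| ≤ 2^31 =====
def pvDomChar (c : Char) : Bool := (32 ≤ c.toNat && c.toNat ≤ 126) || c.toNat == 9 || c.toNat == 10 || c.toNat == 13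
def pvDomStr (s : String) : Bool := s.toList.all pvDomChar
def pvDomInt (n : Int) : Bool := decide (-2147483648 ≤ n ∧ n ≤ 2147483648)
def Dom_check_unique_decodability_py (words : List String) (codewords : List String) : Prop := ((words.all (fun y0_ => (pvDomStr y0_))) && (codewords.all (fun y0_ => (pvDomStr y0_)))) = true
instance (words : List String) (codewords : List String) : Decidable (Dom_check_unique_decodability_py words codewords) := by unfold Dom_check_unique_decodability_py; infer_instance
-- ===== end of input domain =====

-- B groups all words by codeword in one pass, then verifies each group is constant; same O(n) cost, different decomposition ("alternative").

-- ===== PORT A =====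
-- A's for-loop over range(len(codewords)) with early 'break'; the getD "" totalizes
-- indexing — under Pre_ (equal lengths) every index is in range, so it is exact.
def pvLoopA (words codewords : List String) (mapping : PySem.Dict String String) : List Int → Bool
  | [] => true
  | i :: rest =>
    let w := (PySem.List.pyGet? words i).getD ""
    let cw := (PySem.List.pyGet? codewords i).getD ""
    if mapping.contains cw = false then
      pvLoopA words codewords (mapping.insert cw w) rest
    else if mapping.getD cw "" ≠ w then false
    else pvLoopA words codewords mapping rest

def check_unique_decodability_py (words : List String) (codewords : List String) : Bool :=
  -- 'assert len(words) == len(codewords)' raises on unequal lengths: excluded by Pre_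
  pvLoopA words codewords PySem.Dict.empty (PySem.List.pyRange 0 (codewords.length : Int) 1)

-- ===== PORT B =====
-- groups.setdefault(cw, []).append(w) over zip(words, codewords)
def pvGroupsB (ps : List (String × String)) : PySem.Dict String (List String) :=
  ps.foldl (fun d p => d.modify p.1 [] (fun g => g ++ [p.2])) PySem.Dict.empty

def check_unique_decodability_py_alt (words : List String) (codewords : List String) : Bool :=
  -- 'assert len(words) == len(codewords)' raises on unequal lengths: excluded by Pre_
  let groups := pvGroupsB (codewords.zip words)
  -- all(all(x == g[0] for x in g) for g in groups.values()); groups' values are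
  -- nonempty, so g[0] is exactly g.headD ""
  groups.values.all (fun g => g.all (fun x => x == g.headD ""))

-- ===== PRECONDITION & SPEC =====
-- Pre_ excludes exactly the inputs on which A's assert raises AssertionError.
def Pre_check_unique_decodability_py (words : List String) (codewords : List String) : Prop :=
  words.length = codewords.length
instance (words : List String) (codewords : List String) : Decidable (Pre_check_unique_decodability_py words codewords) := by unfold Pre_check_unique_decodability_py; infer_instance

def pvWitness_check_unique_decodability_py : List String × List String :=
  (["a", "b", "a"], ["0", "10", "0"])

def Spec_check_unique_decodability_py (words : List String) (codewords : List String) (out : Bool) : Prop := out = check_unique_decodability_py_alt words codewords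
instance (words : List String) (codewords : List String) (out : Bool) : Decidable (Spec_check_unique_decodability_py words codewords out) := by unfold Spec_check_unique_decodability_py; infer_instance

-- ===== CLAIM (what is proved, stated in full; the proofs are below) =====
def Claim_equal_check_unique_decodability_py : Prop := ∀ (words : List String) (codewords : List String), Dom_check_unique_decodability_py words codewords → Pre_check_unique_decodability_py words codewords → Spec_check_unique_decodability_py words codewords (check_unique_decodability_py words codewords)

-- ===== LEMMAS AND PROOFS =====

-- A's loop recast over the list of (codeword, word) pairs (proof helper).
def pvLoopP (mapping : PySem.Dict String String) : List (String × String) → Bool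
  | [] => true
  | p :: rest =>
    if mapping.contains p.1 = false then pvLoopP (mapping.insert p.1 p.2) rest
    else if mapping.getD p.1 "" ≠ p.2 then false
    else pvLoopP mapping rest

-- the consistency property both programs decide
def pvQ (ps : List (String × String)) : Prop :=
  ∀ p ∈ ps, ∀ q ∈ ps, p.1 = q.1 → p.2 = q.2

theorem pvLoopA_eq_loopP (words codewords : List String)
    (hlen : words.length = codewords.length) :
    ∀ (k : Nat) (m : PySem.Dict String String), k ≤ codewords.length →
      pvLoopA words codewords m (PySem.List.pyRange (k : Int) (codewords.length : Int) 1)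
        = pvLoopP m ((codewords.zip words).drop k) := by
  intro k
  induction hk : codewords.length - k generalizing k with
  | zero =>
    intro m hle
    have hk' : k = codewords.length := by omega
    subst hk'
    rw [PySem.List.pyRange_one_eq_nil (by omega)]
    rw [List.drop_eq_nil_of_le (by simp only [List.length_zip]; omega)]
    rfl
  | succ n ih =>
    intro m hle
    have hklt : k < codewords.length := by omega
    have hkw : k < words.length := by omega
    have hkz : k < (codewords.zip words).length := by simp [List.length_zip]; omega
    rw [PySem.List.pyRange_one_cons (by exact_mod_cast hklt)]
    rw [List.drop_eq_getElem_cons hkz]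
    have hgetw : (PySem.List.pyGet? words (k : Int)).getD "" = words[k] := by
      simp [PySem.List.pyGet?_natCast, List.getElem?_eq_getElem hkw]
    have hgetc : (PySem.List.pyGet? codewords (k : Int)).getD "" = codewords[k] := by
      simp [PySem.List.pyGet?_natCast, List.getElem?_eq_getElem hklt]
    have hzk : (codewords.zip words)[k] = (codewords[k], words[k]) := by
      simp [List.getElem_zip]
    have hcast : ((k : Int) + 1) = ((k + 1 : Nat) : Int) := by push_cast; ring
    simp only [pvLoopA, pvLoopP, hgetw, hgetc, hzk, hcast]
    by_cases hc : m.contains codewords[k] = false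
    · simp only [hc, if_true]
      exact ih (k + 1) (by omega) (m.insert codewords[k] words[k]) (by omega)
    · simp only [hc]
      by_cases hne : m.getD codewords[k] "" ≠ words[k]
      · simp [hne]
      · simp only [hne, if_false]
        exact ih (k + 1) (by omega) m (by omega)

theorem pvLoopP_iff (ps : List (String × String)) :
    ∀ (m : PySem.Dict String String),
      pvLoopP m ps = true ↔
        (pvQ ps ∧ ∀ p ∈ ps, ∀ w, m.get? p.1 = some w → p.2 = w) := by
  induction ps with
  | nil => intro m; simp [pvLoopP, pvQ]
  | cons p rest ih =>
    intro m
    by_cases hc : m.contains p.1 = false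
    · have hnone : m.get? p.1 = none := by
        rw [PySem.Dict.get?_eq_none_iff_contains]; exact hc
      simp only [pvLoopP, hc, if_true, ih]
      constructor
      · rintro ⟨hQ, hC⟩
        have hd : ∀ q ∈ rest, q.1 = p.1 → q.2 = p.2 := by
          intro q hq hqe
          exact hC q hq p.2 (by rw [PySem.Dict.get?_insert, if_pos hqe])
        refine ⟨?_, ?_⟩
        · intro a ha b hb hab
          rcases List.mem_cons.mp ha with rfl | ha' <;>
            rcases List.mem_cons.mp hb with rfl | hb'
          · rfl
          · exact (hd b hb' hab.symm).symm
          · exact hd a ha' hab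
          · exact hQ a ha' b hb' hab
        · intro a ha w hw
          rcases List.mem_cons.mp ha with rfl | ha'
          · rw [hnone] at hw; cases hw
          · by_cases hap : a.1 = p.1
            · rw [hap, hnone] at hw; cases hw
            · exact hC a ha' w (by rw [PySem.Dict.get?_insert, if_neg hap]; exact hw)
      · rintro ⟨hQ, hC⟩
        refine ⟨?_, ?_⟩
        · intro a ha b hb hab
          exact hQ a (List.mem_cons_of_mem _ ha) b (List.mem_cons_of_mem _ hb) hab
        · intro a ha w hw
          rw [PySem.Dict.get?_insert] at hw
          by_cases hap : a.1 = p.1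
          · rw [if_pos hap] at hw
            cases hw
            exact hQ a (List.mem_cons_of_mem _ ha) p (List.mem_cons_self ..) hap
          · rw [if_neg hap] at hw
            exact hC a (List.mem_cons_of_mem _ ha) w hw
    · obtain ⟨w0, hw0⟩ : ∃ w0, m.get? p.1 = some w0 := by
        cases h : m.get? p.1 with
        | none =>
          rw [PySem.Dict.get?_eq_none_iff_contains] at h
          exact absurd h hc
        | some v => exact ⟨v, rfl⟩
      have hgd : m.getD p.1 "" = w0 := by
        rw [PySem.Dict.getD_eq_get?_getD, hw0]; rfl
      by_cases heq : w0 = p.2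
      · have hstep : pvLoopP m (p :: rest) = pvLoopP m rest := by
          simp [pvLoopP, hc, hgd, heq]
        rw [hstep, ih]
        constructor
        · rintro ⟨hQ, hC⟩
          have hd : ∀ q ∈ rest, q.1 = p.1 → q.2 = p.2 := by
            intro q hq hqe
            rw [← heq]
            exact hC q hq w0 (by rw [hqe, hw0])
          refine ⟨?_, ?_⟩
          · intro a ha b hb hab
            rcases List.mem_cons.mp ha with rfl | ha' <;>
              rcases List.mem_cons.mp hb with rfl | hb'
            · rfl
            · exact (hd b hb' hab.symm).symm
            · exact hd a ha' hab
            · exact hQ a ha' b hb' hab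
          · intro a ha w hw
            rcases List.mem_cons.mp ha with rfl | ha'
            · rw [hw0] at hw; cases hw; exact heq.symm
            · exact hC a ha' w hw
        · rintro ⟨hQ, hC⟩
          exact ⟨fun a ha b hb hab =>
              hQ a (List.mem_cons_of_mem _ ha) b (List.mem_cons_of_mem _ hb) hab,
            fun a ha w hw => hC a (List.mem_cons_of_mem _ ha) w hw⟩
      · have hstep : pvLoopP m (p :: rest) = false := by
          simp [pvLoopP, hc, hgd, heq]
        rw [hstep]
        simp only [Bool.false_eq_true, false_iff]
        rintro ⟨hQ, hC⟩
        exact heq (hC p (List.mem_cons_self ..) w0 hw0).symm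

-- the word-lists B groups: all words carried by codeword cw
theorem pvGroupsB_getD (ps : List (String × String)) (cw : String) :
    (pvGroupsB ps).getD cw [] = (ps.filter (fun p => p.1 == cw)).map (·.2) := by
  unfold pvGroupsB
  rw [PySem.Dict.getD_foldl_modify_append, PySem.Dict.getD_empty]
  rfl

theorem pvB_iff (words codewords : List String)
    (hlen : words.length = codewords.length) :
    check_unique_decodability_py_alt words codewords = true ↔ pvQ (codewords.zip words) := by
  rw [show check_unique_decodability_py_alt words codewords
      = ((pvGroupsB (codewords.zip words)).values.all
          (fun g => g.all (fun x => x == g.headD ""))) from rfl]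
  have hnodup : (pvGroupsB (codewords.zip words)).keys.Nodup := by
    unfold pvGroupsB
    exact PySem.Dict.nodup_keys_foldl_modify_key _ _ _ _ _ (by simp [PySem.Dict.keys_empty])
  have hkeys : (pvGroupsB (codewords.zip words)).keys
      = PySem.Set.ofList ((codewords.zip words).map (·.1)) := by
    unfold pvGroupsB
    rw [PySem.Dict.keys_foldl_modify_key]
    simp [PySem.Dict.keys_empty, PySem.Set.update_nil_left]
  have hvals := PySem.Dict.values_eq_map_keys (pvGroupsB (codewords.zip words)) hnodup []
  rw [hvals, hkeys]
  have hfst : (codewords.zip words).map (·.1) = codewords :=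
    List.map_fst_zip (by omega)
  rw [hfst]
  simp only [List.all_eq_true, List.mem_map]
  constructor
  · rintro hB p hp q hq hpq
    obtain ⟨hp1, _⟩ := List.of_mem_zip hp
    have hcw : p.1 ∈ PySem.Set.ofList codewords := (PySem.Set.mem_ofList _ _).mpr hp1
    have hall := hB _ ⟨p.1, hcw, rfl⟩
    set G := (pvGroupsB (codewords.zip words)).getD p.1 [] with hG
    have hGfilter := pvGroupsB_getD (codewords.zip words) p.1
    have hpm : p.2 ∈ G := by
      rw [hG, hGfilter]
      exact List.mem_map.mpr ⟨p, List.mem_filter.mpr ⟨hp, by simp⟩, rfl⟩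
    have hqm : q.2 ∈ G := by
      rw [hG, hGfilter]
      exact List.mem_map.mpr ⟨q, List.mem_filter.mpr ⟨hq, by simp [hpq]⟩, rfl⟩
    have h1 := hall p.2 hpm
    have h2 := hall q.2 hqm
    rw [beq_iff_eq] at h1 h2
    rw [h1, h2]
  · intro hQ g hg
    obtain ⟨cw, _, rfl⟩ := hg
    intro x hx
    rw [pvGroupsB_getD] at hx
    obtain ⟨p, hpf, rfl⟩ := List.mem_map.mp hx
    obtain ⟨hp, hpcw⟩ := List.mem_filter.mp hpf
    cases hGn : (pvGroupsB (codewords.zip words)).getD cw [] with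
    | nil =>
      rw [pvGroupsB_getD] at hGn
      rw [hGn] at hx
      cases hx
    | cons a t =>
      have ha : a ∈ (pvGroupsB (codewords.zip words)).getD cw [] := by
        rw [hGn]; exact List.mem_cons_self ..
      rw [pvGroupsB_getD] at ha
      obtain ⟨q, hqf, rfl⟩ := List.mem_map.mp ha
      obtain ⟨hq, hqcw⟩ := List.mem_filter.mp hqf
      simp only [List.headD_cons, beq_iff_eq]
      exact hQ p hp q hq (by rw [beq_iff_eq] at hpcw hqcw; rw [hpcw, hqcw])

-- ===== VERDICT (by name: the statement is the Claim_ definition above) =====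
theorem check_unique_decodability_py_spec : Claim_equal_check_unique_decodability_py := by
  intro words codewords _ hpre
  unfold Spec_check_unique_decodability_py
  have hA : check_unique_decodability_py words codewords
      = pvLoopP PySem.Dict.empty (codewords.zip words) := by
    unfold check_unique_decodability_py
    have := pvLoopA_eq_loopP words codewords hpre 0 PySem.Dict.empty (by omega)
    simpa using this
  have hAiff : check_unique_decodability_py words codewords = true ↔ pvQ (codewords.zip words) := by
    rw [hA, pvLoopP_iff]
    constructor
    · exact fun h => h.1
    · intro h
      exact ⟨h, by intro p _ w hw; rw [PySem.Dict.get?_empty] at hw; cases hw⟩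
  have hBiff := pvB_iff words codewords hpre
  rw [Bool.eq_iff_iff, hAiff, hBiff]
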